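-- pv_equiv track=rewrite | github.com/LarsLKarlsson68/Italian-Dungeons | random_maps.py | bottleneck
-- ===== SOURCE A (Python) =====
-- def bottleneck(grid,x,y,terrain):
--     # Used to identify cells that should not be blocked
--     # Compute connected components for the 8 cells surrounding a given cell (x,y)
--     cells = list()
--     components = list()
--     for x1 in range(x-1,x+2):
--         for y1 in range(y-1,y+2):
--             if grid[y1][x1] not in terrain:
--                 cells.append((x1,y1))
--     while cells:
--         # Start a component with a singe cell
--         components.append([cells[0]])
--         del cells[0]
--         found = True
--         while found:
--             found = False
--             for i in range(len(cells)):
--                 x1,y1 = cells[i]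
--                 # Check if cell is connected to any cell in last component
--                 for j in range(len(components[-1])):
--                     x2,y2 = components[-1][j]
--                     if -1 <= x1-x2 <= 1 and -1 <= y1-y2 <= 1:
--                         found = True
--                         components[-1].append(cells[i])
--                         del cells[i]
--                         break
--                 if found:
--                     break
--     if len(components) > 1:
--         return True
--     else:
--         return False
-- ===== SOURCE B (Python) =====
-- def bottleneck(grid, x, y, terrain):
--     # BFS flood fill over the blocked cells of the 3x3 neighborhood:
--     # count connected components (8-adjacency); True iff more than one.
--     blocked = [(x1, y1)
--                for x1 in range(x - 1, x + 2)
--                for y1 in range(y - 1, y + 2)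
--                if grid[y1][x1] not in terrain]
--     count = 0
--     remaining = blocked
--     while remaining:
--         queue = [remaining.pop(0)]
--         count += 1
--         while queue:
--             qx, qy = queue.pop(0)
--             near, far = [], []
--             for c in remaining:
--                 (near if abs(c[0] - qx) <= 1 and abs(c[1] - qy) <= 1 else far).append(c)
--             queue.extend(near)
--             remaining = far
--     return count > 1
-- ===== Notes on version B (the rewrite author's own statement) =====
-- stated objective: alternative
-- what changed: Replaces A's repeated rescan-the-remaining-cells-until-no-growth component builder with a BFS flood fill (explicit queue, one partition of the remaining cells per dequeued cell) that counts components directly.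
import Mathlib
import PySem

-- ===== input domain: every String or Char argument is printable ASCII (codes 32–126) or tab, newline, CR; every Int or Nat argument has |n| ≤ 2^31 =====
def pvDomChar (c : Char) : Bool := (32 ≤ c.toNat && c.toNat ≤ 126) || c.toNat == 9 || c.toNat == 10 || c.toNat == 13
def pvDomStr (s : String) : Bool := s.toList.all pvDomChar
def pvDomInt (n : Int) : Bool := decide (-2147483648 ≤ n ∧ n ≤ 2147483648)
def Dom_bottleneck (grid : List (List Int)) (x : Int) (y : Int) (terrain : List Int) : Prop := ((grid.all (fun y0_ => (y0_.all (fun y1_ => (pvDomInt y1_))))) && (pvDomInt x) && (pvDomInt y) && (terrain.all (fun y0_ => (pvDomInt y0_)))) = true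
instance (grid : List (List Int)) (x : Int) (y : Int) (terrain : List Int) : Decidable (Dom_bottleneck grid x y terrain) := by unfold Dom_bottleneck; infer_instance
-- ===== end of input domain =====

-- B replaces A's rescan-until-no-growth component builder by a BFS flood fill that counts
-- components; both build the same blocked-cell list from the same grid accesses.

-- ===== PORT A =====

-- grid[y1][x1] not in terrain; `none` (Python IndexError) is excluded by Pre_ (skipped here)
def cellBlocked (grid : List (List Int)) (terrain : List Int) (x1 y1 : Int) : Bool :=
  match PySem.List.pyGet? grid y1 with
  | none => false
  | some row =>
    match PySem.List.pyGet? row x1 with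
    | none => false
    | some v => !(terrain.contains v)

-- the two nested `for` loops appending (x1,y1) when blocked
def cellsOfA (grid : List (List Int)) (x y : Int) (terrain : List Int) : List (Int × Int) :=
  (PySem.List.pyRange (x - 1) (x + 2) 1).foldl (fun acc x1 =>
    (PySem.List.pyRange (y - 1) (y + 2) 1).foldl (fun acc2 y1 =>
      if cellBlocked grid terrain x1 y1 then acc2 ++ [(x1, y1)] else acc2) acc) []

-- `-1 <= x1-x2 <= 1 and -1 <= y1-y2 <= 1`
def adjA (c d : Int × Int) : Bool :=
  decide (-1 ≤ c.1 - d.1) && decide (c.1 - d.1 ≤ 1) && decide (-1 ≤ c.2 - d.2) && decide (c.2 - d.2 ≤ 1)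

-- the `for i in range(len(cells))` / `for j in range(len(components[-1]))` scan: the first
-- cell of `cells` adjacent to a member of the component, with the cells list after `del cells[i]`
def findAdjA (comp : List (Int × Int)) : List (Int × Int) → Option ((Int × Int) × List (Int × Int))
  | [] => none
  | c :: rest =>
    if comp.any (fun d => adjA c d) then some (c, rest)
    else
      match findAdjA comp rest with
      | none => none
      | some (d, rest') => some (d, c :: rest')

-- the inner `while found` loop; fuel bounds the iterations (each one removes a cell)
def growA : Nat → List (Int × Int) → List (Int × Int) → List (Int × Int) × List (Int × Int)
  | 0, comp, cells => (comp, cells)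
  | n + 1, comp, cells =>
    match findAdjA comp cells with
    | none => (comp, cells)
    | some (c, rest) => growA n (comp ++ [c]) rest

-- the outer `while cells` loop, accumulating `components`
def outerA : Nat → List (List (Int × Int)) → List (Int × Int) → List (List (Int × Int))
  | 0, comps, _ => comps
  | _ + 1, comps, [] => comps
  | n + 1, comps, c :: rest =>
    let p := growA rest.length [c] rest
    outerA n (comps ++ [p.1]) p.2

def bottleneck (grid : List (List Int)) (x : Int) (y : Int) (terrain : List Int) : Bool :=
  let cells := cellsOfA grid x y terrain
  decide ((outerA cells.length [] cells).length > 1)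

-- ===== PORT B =====

-- the list comprehension building `blocked`
def cellsOfB (grid : List (List Int)) (x y : Int) (terrain : List Int) : List (Int × Int) :=
  (PySem.List.pyRange (x - 1) (x + 2) 1).flatMap (fun x1 =>
    ((PySem.List.pyRange (y - 1) (y + 2) 1).filter (fun y1 => cellBlocked grid terrain x1 y1)).map
      (fun y1 => (x1, y1)))

-- `abs(c[0]-qx) <= 1 and abs(c[1]-qy) <= 1`
def nearB (q c : Int × Int) : Bool := decide (|c.1 - q.1| ≤ 1) && decide (|c.2 - q.2| ≤ 1)

-- the inner `while queue` BFS loop: dequeue one cell, partition `remaining` around it;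
-- fuel = queue.length + remaining.length (the sum drops by one each step)
def bfsB : Nat → List (Int × Int) → List (Int × Int) → List (Int × Int)
  | 0, _, remaining => remaining
  | _ + 1, [], remaining => remaining
  | n + 1, q :: qs, remaining =>
    let p := remaining.partition (fun c => nearB q c)
    bfsB n (qs ++ p.1) p.2

-- the outer `while remaining` loop counting components
def outerB : Nat → Nat → List (Int × Int) → Nat
  | 0, count, _ => count
  | _ + 1, count, [] => count
  | n + 1, count, c :: rest => outerB n (count + 1) (bfsB (1 + rest.length) [c] rest)

def bottleneck_alt (grid : List (List Int)) (x : Int) (y : Int) (terrain : List Int) : Bool :=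
  let blocked := cellsOfB grid x y terrain
  decide (outerB blocked.length 0 blocked > 1)

-- ===== PRECONDITION & SPEC =====
-- Pre_ excludes exactly the inputs on which Python's `grid[y1][x1]` raises IndexError for some
-- y1 ∈ {y-1,y,y+1}, x1 ∈ {x-1,x,x+1} (with Python's negative-index wraparound); both Pythons
-- perform these accesses identically, so both raise there.
def Pre_bottleneck (grid : List (List Int)) (x : Int) (y : Int) (terrain : List Int) : Prop :=
  (([-1, 0, 1] : List Int).all (fun dy =>
    match PySem.List.pyGet? grid (y + dy) with
    | none => false
    | some row =>
      ([-1, 0, 1] : List Int).all (fun dx => (PySem.List.pyGet? row (x + dx)).isSome))) = true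
instance (grid : List (List Int)) (x : Int) (y : Int) (terrain : List Int) : Decidable (Pre_bottleneck grid x y terrain) := by unfold Pre_bottleneck; infer_instance

def pvWitness_bottleneck : List (List Int) × Int × Int × List Int :=
  ([[0, 0, 0], [0, 1, 0], [0, 0, 0]], 1, 1, [0])

def Spec_bottleneck (grid : List (List Int)) (x : Int) (y : Int) (terrain : List Int) (out : Bool) : Prop := out = bottleneck_alt grid x y terrain
instance (grid : List (List Int)) (x : Int) (y : Int) (terrain : List Int) (out : Bool) : Decidable (Spec_bottleneck grid x y terrain out) := by unfold Spec_bottleneck; infer_instance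

-- ===== CLAIM (what is proved, stated in full; the proofs are below) =====
def Claim_equal_bottleneck : Prop := ∀ (grid : List (List Int)) (x : Int) (y : Int) (terrain : List Int), Dom_bottleneck grid x y terrain → Pre_bottleneck grid x y terrain → Spec_bottleneck grid x y terrain (bottleneck grid x y terrain)

-- ===== LEMMAS AND PROOFS =====

-- the nine offsets of the 3x3 neighborhood, in the traversal order of both programs
def pvOffs : List (Int × Int) :=
  [(-1, -1), (-1, 0), (-1, 1), (0, -1), (0, 0), (0, 1), (1, -1), (1, 0), (1, 1)]

def pvShift (a b : Int) (p : Int × Int) : Int × Int := (p.1 + a, p.2 + b)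

-- the blocked-cell list written over offsets relative to (x, y)
def relCells (q : Int → Int → Bool) : List (Int × Int) :=
  ([-1, 0, 1] : List Int).flatMap (fun dx =>
    (([-1, 0, 1] : List Int).filter (fun dy => q dx dy)).map (fun dy => (dx, dy)))

-- === the two ports build the same blocked-cell list, a translate of a sublist of pvOffs ===

theorem cellsOfA_eq_cellsOfB (grid : List (List Int)) (x y : Int) (terrain : List Int) :
    cellsOfA grid x y terrain = cellsOfB grid x y terrain := by
  unfold cellsOfA cellsOfB
  simp only [PySem.List.foldl_append_if, PySem.List.foldl_append_eq_flatMap, List.nil_append]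

theorem range3 (a : Int) : PySem.List.pyRange (a - 1) (a + 2) 1 = ([-1, 0, 1] : List Int).map (fun d => a + d) := by
  rw [PySem.List.pyRange_one_cons (by omega), PySem.List.pyRange_one_cons (by omega),
      PySem.List.pyRange_one_cons (by omega), PySem.List.pyRange_one_eq_nil (by omega)]
  simp only [List.map_cons, List.map_nil, List.cons.injEq]
  refine ⟨by omega, by omega, by omega, trivial⟩

theorem seg (q : Int → Bool) (x y dx : Int) (l : List Int) :
    ((l.map (fun d => y + d)).filter q).map (fun y1 => (x + dx, y1))
      = (l.filter (fun dy => q (y + dy))).map (pvShift x y ∘ fun dy => (dx, dy)) := by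
  induction l with
  | nil => rfl
  | cons d t ih =>
    simp only [List.map_cons, List.filter_cons]
    by_cases h : q (y + d)
    · simp only [h, if_true, List.map_cons, ih, Function.comp_apply, pvShift,
        List.cons.injEq, Prod.mk.injEq, and_true]
      omega
    · simp [h, ih]

theorem cellsOfB_eq_shift (grid : List (List Int)) (x y : Int) (terrain : List Int) :
    cellsOfB grid x y terrain
      = (relCells (fun dx dy => cellBlocked grid terrain (x + dx) (y + dy))).map (pvShift x y) := by
  unfold cellsOfB relCells
  rw [range3, range3, List.flatMap_map, List.map_flatMap]
  congr 1
  funext dx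
  rw [List.map_map]
  exact seg (fun y1 => cellBlocked grid terrain (x + dx) y1) x y dx [-1, 0, 1]

theorem relCells_sublist (q : Int → Int → Bool) : (relCells q).Sublist pvOffs := by
  unfold relCells
  simp only [List.flatMap_cons, List.flatMap_nil, List.append_nil]
  show List.Sublist _ ([((-1:Int),(-1:Int)),(-1,0),(-1,1)] ++ ([((0:Int),(-1:Int)),(0,0),(0,1)] ++ [((1:Int),(-1:Int)),(1,0),(1,1)]))
  refine List.Sublist.append ?_ (List.Sublist.append ?_ ?_)
  · exact List.Sublist.map _ List.filter_sublist
  · exact List.Sublist.map _ List.filter_sublist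
  · exact List.Sublist.map _ List.filter_sublist

-- === both component counters are invariant under translating every cell by the same vector ===

theorem adjA_shift (a b : Int) (c d : Int × Int) : adjA (pvShift a b c) (pvShift a b d) = adjA c d := by
  simp only [adjA, pvShift]
  have h1 : c.1 + a - (d.1 + a) = c.1 - d.1 := by ring
  have h2 : c.2 + b - (d.2 + b) = c.2 - d.2 := by ring
  simp only [h1, h2]

theorem findAdjA_shift (a b : Int) (comp cells : List (Int × Int)) :
    findAdjA (comp.map (pvShift a b)) (cells.map (pvShift a b))
      = (findAdjA comp cells).map (fun p => (pvShift a b p.1, p.2.map (pvShift a b))) := by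
  induction cells with
  | nil => rfl
  | cons c rest ih =>
    simp only [List.map_cons, findAdjA, List.any_map]
    rw [show ((fun d => adjA (pvShift a b c) d) ∘ pvShift a b) = fun d => adjA c d from by
      funext d; exact adjA_shift a b c d]
    by_cases h : comp.any (fun d => adjA c d)
    · simp [h]
    · simp only [h, ih]
      cases findAdjA comp rest with
      | none => rfl
      | some p => rfl

theorem growA_shift (a b : Int) (n : Nat) (comp cells : List (Int × Int)) :
    growA n (comp.map (pvShift a b)) (cells.map (pvShift a b))
      = ((growA n comp cells).1.map (pvShift a b), (growA n comp cells).2.map (pvShift a b)) := by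
  induction n generalizing comp cells with
  | zero => rfl
  | succ n ih =>
    simp only [growA, findAdjA_shift a b comp cells]
    cases h : findAdjA comp cells with
    | none => rfl
    | some p =>
      simp only [Option.map_some]
      have := ih (comp ++ [p.1]) p.2
      simpa using this

theorem outerA_shift (a b : Int) (n : Nat) (comps : List (List (Int × Int))) (cells : List (Int × Int)) :
    outerA n (comps.map (List.map (pvShift a b))) (cells.map (pvShift a b))
      = (outerA n comps cells).map (List.map (pvShift a b)) := by
  induction n generalizing comps cells with
  | zero => rfl
  | succ n ih =>
    cases cells with
    | nil => rfl
    | cons c rest =>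
      simp only [List.map_cons, outerA, List.length_map]
      rw [show ([pvShift a b c]) = [c].map (pvShift a b) from rfl, growA_shift]
      have := ih (comps ++ [(growA rest.length [c] rest).1]) (growA rest.length [c] rest).2
      simpa using this

theorem nearB_shift (a b : Int) (q c : Int × Int) : nearB (pvShift a b q) (pvShift a b c) = nearB q c := by
  simp only [nearB, pvShift]
  have h1 : c.1 + a - (q.1 + a) = c.1 - q.1 := by ring
  have h2 : c.2 + b - (q.2 + b) = c.2 - q.2 := by ring
  simp only [h1, h2]

theorem bfsB_shift (a b : Int) (n : Nat) (queue remaining : List (Int × Int)) :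
    bfsB n (queue.map (pvShift a b)) (remaining.map (pvShift a b))
      = (bfsB n queue remaining).map (pvShift a b) := by
  induction n generalizing queue remaining with
  | zero => rfl
  | succ n ih =>
    cases queue with
    | nil => rfl
    | cons q qs =>
      simp only [List.map_cons, bfsB, List.partition_eq_filter_filter, List.filter_map]
      rw [show ((fun c => nearB (pvShift a b q) c) ∘ pvShift a b) = fun c => nearB q c from by
        funext c; exact nearB_shift a b q c]
      rw [show ((not ∘ fun c => nearB (pvShift a b q) c) ∘ pvShift a b) = (not ∘ fun c => nearB q c) from by
        funext c; simp [nearB_shift a b q c]]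
      rw [← List.map_append, ih]

theorem outerB_shift (a b : Int) (n : Nat) (count : Nat) (cells : List (Int × Int)) :
    outerB n count (cells.map (pvShift a b)) = outerB n count cells := by
  induction n generalizing count cells with
  | zero => rfl
  | succ n ih =>
    cases cells with
    | nil => rfl
    | cons c rest =>
      simp only [List.map_cons, outerB, List.length_map]
      rw [show [pvShift a b c] = [c].map (pvShift a b) from rfl, bfsB_shift, ih]

-- === on every sublist of the nine offsets the two counters agree (512 cases) ===

theorem pvKey : ∀ offs ∈ pvOffs.sublists,
    decide ((outerA offs.length [] offs).length > 1) = decide (outerB offs.length 0 offs > 1) := by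
  set_option maxRecDepth 100000 in decide

-- ===== VERDICT (by name: the statement is the Claim_ definition above) =====
theorem bottleneck_spec : Claim_equal_bottleneck := by
  intro grid x y terrain _ _
  unfold Spec_bottleneck bottleneck bottleneck_alt
  rw [cellsOfA_eq_cellsOfB, cellsOfB_eq_shift]
  set q : Int → Int → Bool := fun dx dy => cellBlocked grid terrain (x + dx) (y + dy) with hq
  simp only [List.length_map]
  have hA : (outerA (relCells q).length [] ((relCells q).map (pvShift x y))).length
      = (outerA (relCells q).length [] (relCells q)).length := by
    have := outerA_shift x y (relCells q).length [] (relCells q)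
    simpa using congrArg List.length this
  have hB : outerB (relCells q).length 0 ((relCells q).map (pvShift x y))
      = outerB (relCells q).length 0 (relCells q) := outerB_shift x y _ 0 _
  rw [hA, hB]
  exact pvKey (relCells q) (List.mem_sublists.mpr (relCells_sublist q))
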